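-- pv_equiv track=rewrite | github.com/rush86999/atom | backend/scripts/migrate_db_sessions.py | categorize_by_priority
-- ===== SOURCE A (Python) =====
-- def categorize_by_priority(results: dict) -> dict:
--     """
--     Categorize files by migration priority.
--     """
--     high_priority = []
--     medium_priority = []
--     low_priority = []
--
--     for file_path, issues in results['files_with_issues'].items():
--         line_count = len(issues)
--
--         # High priority: Service layer files with multiple issues
--         if any(path in file_path for path in ['service', 'services', 'core']):
--             if line_count >= 3:
--                 high_priority.append((file_path, line_count))
--             else:
--                 medium_priority.append((file_path, line_count))
--
--         # Medium priority: API routes, integrations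
--         elif any(path in file_path for path in ['api', 'integrations']):
--             if line_count >= 3:
--                 medium_priority.append((file_path, line_count))
--             else:
--                 low_priority.append((file_path, line_count))
--
--         # Low priority: Scripts, tests, tools
--         else:
--             low_priority.append((file_path, line_count))
--
--     # Sort by issue count (descending)
--     high_priority.sort(key=lambda x: x[1], reverse=True)
--     medium_priority.sort(key=lambda x: x[1], reverse=True)
--     low_priority.sort(key=lambda x: x[1], reverse=True)
--
--     return {
--         'high': high_priority,
--         'medium': medium_priority,
--         'low': low_priority
--     }
-- ===== SOURCE B (Python) =====
-- def categorize_by_priority(results: dict) -> dict: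
--     """
--     Categorize files by migration priority.
--     Sorts ONE combined (file, count) list by count (stable, descending),
--     then builds each tier by filtering that pre-sorted list with a tier function.
--     """
--     def tier(fp, n):
--         if any(p in fp for p in ('service', 'services', 'core')):
--             return 'high' if n >= 3 else 'medium'
--         if any(p in fp for p in ('api', 'integrations')):
--             return 'medium' if n >= 3 else 'low'
--         return 'low'
--
--     pairs = sorted(((fp, len(issues)) for fp, issues in results['files_with_issues'].items()),
--                    key=lambda t: t[1], reverse=True)
--     return {k: [t for t in pairs if tier(*t) == k] for k in ('high', 'medium', 'low')}
-- ===== Notes on version B (the rewrite author's own statement) =====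
-- stated objective: alternative
-- what changed: B sorts one combined (file,count) list once by count descending and builds each tier as a filter of that pre-sorted list with a tier-naming function, instead of A's branch-chain partition into three lists followed by three separate sorts; per-bucket order agrees by stability of the sort.
import Mathlib
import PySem

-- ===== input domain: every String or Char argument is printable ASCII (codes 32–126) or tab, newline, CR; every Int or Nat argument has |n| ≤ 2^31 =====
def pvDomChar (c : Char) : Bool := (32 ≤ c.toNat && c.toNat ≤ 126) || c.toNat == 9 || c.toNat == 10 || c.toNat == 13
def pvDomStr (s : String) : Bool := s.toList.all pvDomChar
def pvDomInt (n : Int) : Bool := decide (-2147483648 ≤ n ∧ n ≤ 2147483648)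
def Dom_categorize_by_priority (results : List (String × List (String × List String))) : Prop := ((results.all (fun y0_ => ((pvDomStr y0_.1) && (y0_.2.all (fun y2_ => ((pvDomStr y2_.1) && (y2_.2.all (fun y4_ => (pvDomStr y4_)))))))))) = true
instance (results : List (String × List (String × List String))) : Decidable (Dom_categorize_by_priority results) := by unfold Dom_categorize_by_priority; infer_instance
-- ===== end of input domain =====

-- B sorts one combined (file, count) list once (stable, count descending) and builds each tier as a
-- filter of that pre-sorted list with a tier-naming function, instead of A's branch-chain partition
-- into three lists followed by three separate sorts.

-- ===== PORT A =====
-- one loop step of A: append (fp, n) to the bucket A's branch chain selects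
def pvStepA (acc : List (String × Int) × List (String × Int) × List (String × Int))
    (it : String × List String) :
    List (String × Int) × List (String × Int) × List (String × Int) :=
  let fp := it.1
  let n : Int := it.2.length
  if ["service", "services", "core"].any (fun p => PySem.Str.isIn p fp) then
    if 3 ≤ n then (acc.1 ++ [(fp, n)], acc.2.1, acc.2.2)
    else (acc.1, acc.2.1 ++ [(fp, n)], acc.2.2)
  else if ["api", "integrations"].any (fun p => PySem.Str.isIn p fp) then
    if 3 ≤ n then (acc.1, acc.2.1 ++ [(fp, n)], acc.2.2)
    else (acc.1, acc.2.1, acc.2.2 ++ [(fp, n)])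
  else (acc.1, acc.2.1, acc.2.2 ++ [(fp, n)])

def categorize_by_priority (results : List (String × List (String × List String))) :
    List (String × List (String × Int)) :=
  match PySem.Dict.get? (PySem.Dict.ofList results) "files_with_issues" with
  | none => []   -- Python raises KeyError here; excluded by Pre_
  | some fwi =>
    let b := ((PySem.Dict.ofList fwi).items).foldl pvStepA ([], [], [])
    [("high", PySem.List.sorted b.1 (fun x => x.2) true),
     ("medium", PySem.List.sorted b.2.1 (fun x => x.2) true),
     ("low", PySem.List.sorted b.2.2 (fun x => x.2) true)]

-- ===== PORT B =====
-- B's tier function: the name of the bucket a (file, count) pair belongs to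
def pvTier (fp : String) (n : Int) : String :=
  if ["service", "services", "core"].any (fun p => PySem.Str.isIn p fp) then
    if 3 ≤ n then "high" else "medium"
  else if ["api", "integrations"].any (fun p => PySem.Str.isIn p fp) then
    if 3 ≤ n then "medium" else "low"
  else "low"

def categorize_by_priority_alt (results : List (String × List (String × List String))) :
    List (String × List (String × Int)) :=
  match PySem.Dict.get? (PySem.Dict.ofList results) "files_with_issues" with
  | none => []   -- Python raises KeyError here; excluded by Pre_
  | some fwi =>
    let pairs := PySem.List.sorted
      (((PySem.Dict.ofList fwi).items).map (fun it => (it.1, (it.2.length : Int))))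
      (fun t => t.2) true
    ["high", "medium", "low"].map
      (fun k => (k, pairs.filter (fun t => pvTier t.1 t.2 == k)))

-- ===== PRECONDITION & SPEC =====
-- Pre_ excludes exactly the inputs on which A raises KeyError: no 'files_with_issues' key.
def Pre_categorize_by_priority (results : List (String × List (String × List String))) : Prop :=
  "files_with_issues" ∈ results.map Prod.fst
instance (results : List (String × List (String × List String))) : Decidable (Pre_categorize_by_priority results) := by unfold Pre_categorize_by_priority; infer_instance

def pvWitness_categorize_by_priority : (List (String × List (String × List String))) :=
  [("files_with_issues", [("core/a.py", ["i1", "i2", "i3"]), ("scripts/b.py", ["i1"])])]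

def Spec_categorize_by_priority (results : List (String × List (String × List String))) (out : List (String × List (String × Int))) : Prop := out = categorize_by_priority_alt results
instance (results : List (String × List (String × List String))) (out : List (String × List (String × Int))) : Decidable (Spec_categorize_by_priority results out) := by unfold Spec_categorize_by_priority; infer_instance

-- ===== CLAIM (what is proved, stated in full; the proofs are below) =====
def Claim_equal_categorize_by_priority : Prop := ∀ (results : List (String × List (String × List String))), Dom_categorize_by_priority results → Pre_categorize_by_priority results → Spec_categorize_by_priority results (categorize_by_priority results)

-- ===== LEMMAS AND PROOFS =====

-- bucket predicates (proof-side only)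
def pvSvc (fp : String) : Bool := ["service", "services", "core"].any (fun p => PySem.Str.isIn p fp)
def pvApi (fp : String) : Bool := ["api", "integrations"].any (fun p => PySem.Str.isIn p fp)
def pvH (t : String × Int) : Bool := pvSvc t.1 && decide (3 ≤ t.2)
def pvM (t : String × Int) : Bool := (pvSvc t.1 && !decide (3 ≤ t.2)) || (!pvSvc t.1 && pvApi t.1 && decide (3 ≤ t.2))
def pvL (t : String × Int) : Bool := !pvSvc t.1 && (!pvApi t.1 || !decide (3 ≤ t.2))

theorem stepA_eq (acc : List (String × Int) × List (String × Int) × List (String × Int))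
    (it : String × List String) :
    pvStepA acc it =
      (let t : String × Int := (it.1, (it.2.length : Int))
      if pvH t then (acc.1 ++ [t], acc.2.1, acc.2.2)
      else if pvM t then (acc.1, acc.2.1 ++ [t], acc.2.2)
      else (acc.1, acc.2.1, acc.2.2 ++ [t])) := by
  simp only [pvStepA, pvH, pvM]
  rw [show (["service", "services", "core"].any (fun p => PySem.Str.isIn p it.1)) = pvSvc it.1 from rfl,
      show (["api", "integrations"].any (fun p => PySem.Str.isIn p it.1)) = pvApi it.1 from rfl]
  by_cases hs : pvSvc it.1 = true <;> by_cases ha : pvApi it.1 = true <;>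
    by_cases h3 : (3 : Int) ≤ it.2.length <;> simp [hs, ha, h3]

theorem pvL_eq (t : String × Int) : pvL t = (!pvH t && !pvM t) := by
  simp only [pvH, pvM, pvL]
  cases hs : pvSvc t.1 <;> cases ha : pvApi t.1 <;> cases h3 : decide ((3 : Int) ≤ t.2) <;> rfl

theorem pvM_false_of_H (t : String × Int) (h : pvH t = true) : pvM t = false := by
  simp only [pvH, pvM] at h ⊢
  cases hs : pvSvc t.1 <;> cases h3 : decide ((3 : Int) ≤ t.2) <;> simp [hs, h3] at h ⊢

-- the tier name classifies exactly as the three predicates do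
theorem tier_high (t : String × Int) : (pvTier t.1 t.2 == "high") = pvH t := by
  simp only [pvTier, pvH]
  rw [show (["service", "services", "core"].any (fun p => PySem.Str.isIn p t.1)) = pvSvc t.1 from rfl,
      show (["api", "integrations"].any (fun p => PySem.Str.isIn p t.1)) = pvApi t.1 from rfl]
  by_cases hs : pvSvc t.1 = true <;> by_cases ha : pvApi t.1 = true <;>
    by_cases h3 : (3 : Int) ≤ t.2 <;> simp [hs, ha, h3]

theorem tier_medium (t : String × Int) : (pvTier t.1 t.2 == "medium") = pvM t := by
  simp only [pvTier, pvM]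
  rw [show (["service", "services", "core"].any (fun p => PySem.Str.isIn p t.1)) = pvSvc t.1 from rfl,
      show (["api", "integrations"].any (fun p => PySem.Str.isIn p t.1)) = pvApi t.1 from rfl]
  by_cases hs : pvSvc t.1 = true <;> by_cases ha : pvApi t.1 = true <;>
    by_cases h3 : (3 : Int) ≤ t.2 <;> simp [hs, ha, h3]

theorem tier_low (t : String × Int) : (pvTier t.1 t.2 == "low") = pvL t := by
  simp only [pvTier, pvL]
  rw [show (["service", "services", "core"].any (fun p => PySem.Str.isIn p t.1)) = pvSvc t.1 from rfl,
      show (["api", "integrations"].any (fun p => PySem.Str.isIn p t.1)) = pvApi t.1 from rfl]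
  by_cases hs : pvSvc t.1 = true <;> by_cases ha : pvApi t.1 = true <;>
    by_cases h3 : (3 : Int) ≤ t.2 <;> simp [hs, ha, h3]

-- A's fold computes the three filters of the mapped (file, count) list
theorem foldA_filter (l : List (String × List String)) :
    ∀ h m lo, l.foldl pvStepA (h, m, lo) =
      (h ++ ((l.map (fun it => (it.1, (it.2.length : Int)))).filter pvH),
       m ++ ((l.map (fun it => (it.1, (it.2.length : Int)))).filter pvM),
       lo ++ ((l.map (fun it => (it.1, (it.2.length : Int)))).filter pvL)) := by
  induction l with
  | nil => intro h m lo; simp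
  | cons it l ih =>
    intro h m lo
    rw [List.foldl_cons, stepA_eq]
    set t : String × Int := (it.1, (it.2.length : Int)) with ht
    by_cases hH : pvH t = true
    · have hM : pvM t = false := pvM_false_of_H t hH
      have hL : pvL t = false := by rw [pvL_eq, hH]; rfl
      simp only [hH, if_pos]
      rw [ih, List.map_cons, ← ht, List.filter_cons_of_pos hH,
        List.filter_cons_of_neg (by simp [hM]), List.filter_cons_of_neg (by simp [hL])]
      simp
    · by_cases hM : pvM t = true
      · have hL : pvL t = false := by rw [pvL_eq, hM, Bool.not_true, Bool.and_false]
        simp only [hH, hM, if_neg, if_pos, Bool.false_eq_true, not_false_iff]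
        rw [ih, List.map_cons, ← ht, List.filter_cons_of_neg (by simp [hH]),
          List.filter_cons_of_pos hM, List.filter_cons_of_neg (by simp [hL])]
        simp
      · have hL : pvL t = true := by
          rw [pvL_eq, Bool.eq_false_iff.mpr hH, Bool.eq_false_iff.mpr hM]; rfl
        simp only [hH, hM, if_neg, Bool.false_eq_true, not_false_iff]
        rw [ih, List.map_cons, ← ht, List.filter_cons_of_neg (by simp [hH]),
          List.filter_cons_of_neg (by simp [hM]), List.filter_cons_of_pos hL]
        simp

-- inserting an element whose key strictly dominates every element goes to the front
theorem insertBy_front (x : String × Int) (l : List (String × Int))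
    (hall : ∀ z ∈ l, z.2 < x.2) :
    PySem.List.insertBy (fun a b => decide (b.2 < a.2)) x l = x :: l := by
  cases l with
  | nil => rfl
  | cons z t =>
    have : z.2 < x.2 := hall z (List.mem_cons_self)
    simp [PySem.List.insertBy, this]

-- filtering commutes with inserting into a descending-sorted list
theorem filter_insertBy (p : (String × Int) → Bool) (x : String × Int) :
    ∀ (ys : List (String × Int)), ys.Pairwise (fun a b => b.2 ≤ a.2) →
    (PySem.List.insertBy (fun a b => decide (b.2 < a.2)) x ys).filter p =
      if p x then PySem.List.insertBy (fun a b => decide (b.2 < a.2)) x (ys.filter p)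
      else ys.filter p := by
  intro ys
  induction ys with
  | nil =>
    intro _
    by_cases hp : p x <;> simp [PySem.List.insertBy, hp]
  | cons y t ih =>
    intro hpw
    have hpt : t.Pairwise (fun a b => b.2 ≤ a.2) := hpw.tail
    have hyall : ∀ z ∈ t, z.2 ≤ y.2 := fun z hz => (List.pairwise_cons.mp hpw).1 z hz
    by_cases hlt : y.2 < x.2
    · have : PySem.List.insertBy (fun a b => decide (b.2 < a.2)) x (y :: t) = x :: y :: t := by
        simp [PySem.List.insertBy, hlt]
      rw [this]
      by_cases hp : p x
      · rw [List.filter_cons_of_pos hp, if_pos hp]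
        have hall : ∀ z ∈ (y :: t).filter p, z.2 < x.2 := by
          intro z hz
          have hz' := List.mem_of_mem_filter hz
          rcases List.mem_cons.mp hz' with rfl | hzt
          · exact hlt
          · exact lt_of_le_of_lt (hyall z hzt) hlt
        rw [insertBy_front x _ hall]
      · rw [List.filter_cons_of_neg hp, if_neg hp]
    · have : PySem.List.insertBy (fun a b => decide (b.2 < a.2)) x (y :: t) =
          y :: PySem.List.insertBy (fun a b => decide (b.2 < a.2)) x t := by
        simp [PySem.List.insertBy, hlt]
      rw [this]
      by_cases hpy : p y
      · rw [List.filter_cons_of_pos hpy, List.filter_cons_of_pos hpy, ih hpt]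
        by_cases hp : p x
        · rw [if_pos hp, if_pos hp]
          have : PySem.List.insertBy (fun a b => decide (b.2 < a.2)) x (y :: t.filter p) =
              y :: PySem.List.insertBy (fun a b => decide (b.2 < a.2)) x (t.filter p) := by
            simp [PySem.List.insertBy, hlt]
          rw [this]
        · rw [if_neg hp, if_neg hp]
      · rw [List.filter_cons_of_neg hpy, List.filter_cons_of_neg hpy, ih hpt]

-- filtering commutes with the stable descending sort
theorem filter_sorted (p : (String × Int) → Bool) (xs : List (String × Int)) :
    (PySem.List.sorted xs (fun t => t.2) true).filter p =
      PySem.List.sorted (xs.filter p) (fun t => t.2) true := by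
  induction xs using List.reverseRecOn with
  | nil => simp [PySem.List.sorted_rev_eq_foldl_insertBy]
  | append_singleton xs x ih =>
    rw [PySem.List.sorted_rev_eq_foldl_insertBy, List.foldl_append, List.foldl_cons, List.foldl_nil,
      ← PySem.List.sorted_rev_eq_foldl_insertBy,
      filter_insertBy p x _ (PySem.List.sorted_pairwise_rev xs (fun t => t.2)),
      List.filter_append]
    by_cases hp : p x
    · rw [if_pos hp, List.filter_cons_of_pos hp, List.filter_nil,
        PySem.List.sorted_rev_eq_foldl_insertBy (xs.filter p ++ [x]), List.foldl_append,
        List.foldl_cons, List.foldl_nil, ← PySem.List.sorted_rev_eq_foldl_insertBy, ih]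
    · rw [if_neg hp, List.filter_cons_of_neg hp, List.filter_nil, List.append_nil, ih]

-- ===== VERDICT (by name: the statement is the Claim_ definition above) =====
theorem categorize_by_priority_spec : Claim_equal_categorize_by_priority := by
  intro results _ _
  unfold Spec_categorize_by_priority categorize_by_priority categorize_by_priority_alt
  cases hk : PySem.Dict.get? (PySem.Dict.ofList results) "files_with_issues" with
  | none => rfl
  | some fwi =>
    simp only [List.map_cons, List.map_nil]
    rw [foldA_filter]
    simp only [List.nil_append]
    have hH := funext fun t => tier_high t
    have hM := funext fun t => tier_medium t
    have hL := funext fun t => tier_low t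
    rw [show (fun t : String × Int => pvTier t.1 t.2 == "high") = pvH from hH,
        show (fun t : String × Int => pvTier t.1 t.2 == "medium") = pvM from hM,
        show (fun t : String × Int => pvTier t.1 t.2 == "low") = pvL from hL,
        filter_sorted pvH, filter_sorted pvM, filter_sorted pvL]
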